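-- pv_equiv track=rewrite | github.com/oppolla/Self-Organizing-Virtual-Lifeform | sovl_system/sovl_tooler_unattached.py | detect_tool_activation
-- ===== SOURCE A (Python) =====
-- def levenshtein_distance(a: str, b: str) -> int:
--     if len(a) < len(b):
--         return levenshtein_distance(b, a)
--     if len(b) == 0:
--         return len(a)
--     previous_row = range(len(b) + 1)
--     for i, c1 in enumerate(a):
--         current_row = [i + 1]
--         for j, c2 in enumerate(b):
--             insertions = previous_row[j + 1] + 1
--             deletions = current_row[j] + 1
--             substitutions = previous_row[j] + (c1 != c2)
--             current_row.append(min(insertions, deletions, substitutions))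
--         previous_row = current_row
--     return previous_row[-1]
--
-- TOOL_ACTIVATION_PHRASES = [
--     "run", "execute", "do", "start", "perform", "please", "can you", "could you", "would you", "i need you to", "initiate"
-- ]
--
-- def detect_tool_activation(user_input: str, max_distance: int = 1) -> bool:
--     """
--     Returns True if the user input matches a command-style pattern for tool/procedure activation.
--     Uses strict matching and Levenshtein distance fuzzy matching (max_distance=1 by default).
--     """
--     text = user_input.lower().strip()
--     for phrase in TOOL_ACTIVATION_PHRASES:
--         # Strict match at start
--         if text.startswith(phrase):
--             return True
--         # Fuzzy match: allow small typos at the start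
--         segment = text[:len(phrase)+2]
--         if levenshtein_distance(segment, phrase) <= max_distance:
--             return True
--     return False
-- ===== SOURCE B (Python) =====
-- TOOL_ACTIVATION_PHRASES = [
--     "run", "execute", "do", "start", "perform", "please", "can you", "could you", "would you", "i need you to", "initiate"
-- ]
--
-- def levenshtein_distance(a: str, b: str) -> int:
--     """Top-down memoized recursive edit distance (same recurrence, recursive form)."""
--     memo = {}
--     def lev(i: int, j: int) -> int:
--         if i == 0:
--             return j
--         if j == 0:
--             return i
--         if (i, j) in memo:
--             return memo[(i, j)]
--         cost = 0 if a[i - 1] == b[j - 1] else 1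
--         v = min(lev(i - 1, j) + 1, lev(i, j - 1) + 1, lev(i - 1, j - 1) + cost)
--         memo[(i, j)] = v
--         return v
--     return lev(len(a), len(b))
--
-- def detect_tool_activation(user_input: str, max_distance: int = 1) -> bool:
--     text = user_input.lower().strip()
--     return any(
--         text.startswith(phrase)
--         or levenshtein_distance(text[:len(phrase) + 2], phrase) <= max_distance
--         for phrase in TOOL_ACTIVATION_PHRASES
--     )
-- ===== Notes on version B (the rewrite author's own statement) =====
-- stated objective: alternative
-- what changed: levenshtein_distance is reimplemented as a top-down memoized recursion on prefix indices (dict memo) instead of the bottom-up rolling-row DP (and the argument-swap/empty-string preamble disappears); the phrase loop with early returns becomes a single any() over the phrase list.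
import Mathlib
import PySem

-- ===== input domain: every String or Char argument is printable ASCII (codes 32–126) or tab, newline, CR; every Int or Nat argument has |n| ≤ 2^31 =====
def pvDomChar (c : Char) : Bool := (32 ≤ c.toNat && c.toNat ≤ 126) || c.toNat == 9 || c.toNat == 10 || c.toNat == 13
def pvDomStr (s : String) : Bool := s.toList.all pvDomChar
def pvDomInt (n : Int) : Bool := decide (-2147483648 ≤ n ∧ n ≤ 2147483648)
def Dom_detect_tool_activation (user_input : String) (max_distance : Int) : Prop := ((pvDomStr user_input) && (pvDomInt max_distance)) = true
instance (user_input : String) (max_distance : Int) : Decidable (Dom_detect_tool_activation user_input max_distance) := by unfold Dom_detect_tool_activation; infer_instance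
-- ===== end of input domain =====

-- B replaces A's bottom-up rolling-row Levenshtein DP by a top-down memoized recursion on
-- prefix indices and the early-return phrase loop by any(); same results, similar cost.

-- the module constant TOOL_ACTIVATION_PHRASES (shared by both Pythons)
def pvPhrases : List (List Char) :=
  ["run".toList, "execute".toList, "do".toList, "start".toList, "perform".toList,
   "please".toList, "can you".toList, "could you".toList, "would you".toList,
   "i need you to".toList, "initiate".toList]

-- ===== PORT A =====
-- levenshtein_distance of Source A: argument swap, empty-b shortcut, rolling-row DP.
-- previous_row[j+1] / current_row[j] / previous_row[j] are always in range, so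
-- pyGetD … 0 is exactly Python's indexing here (no IndexError is reachable).
def levA (a b : List Char) : Int :=
  if h : a.length < b.length then levA b a
  else if b.length = 0 then (a.length : Int)
  else
    let previous_row : List Int := (List.range (b.length + 1)).map (fun n : Nat => (n : Int))
    let final : List Int :=
      (PySem.List.enumerate a 0).foldl
        (fun prev ic =>
          (PySem.List.enumerate b 0).foldl
            (fun cur jc =>
              let insertions := PySem.List.pyGetD prev (jc.1 + 1) 0 + 1
              let deletions := PySem.List.pyGetD cur jc.1 0 + 1
              let substitutions := PySem.List.pyGetD prev jc.1 0 + (if ic.2 ≠ jc.2 then 1 else 0)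
              cur ++ [min insertions (min deletions substitutions)])
            [ic.1 + 1])
        previous_row
    PySem.List.pyGetD final (-1) 0
termination_by b.length
decreasing_by exact h

-- the for-loop of detect_tool_activation with its two early returns
def detectLoopA (text : List Char) (max_distance : Int) : List (List Char) → Bool
  | [] => false
  | p :: rest =>
    if PySem.Chars.startswith text p then true
    else
      let segment := PySem.List.slice text none (some ((p.length : Int) + 2))
      if levA segment p ≤ max_distance then true
      else detectLoopA text max_distance rest

def detect_tool_activation (user_input : String) (max_distance : Int) : Bool :=
  let text := PySem.Chars.strip (PySem.Chars.lower user_input.toList)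
  detectLoopA text max_distance pvPhrases

-- ===== PORT B =====
-- top-down memoized recursion lev(i, j) of Source B; the memo dict is threaded through.
-- a[i-1] == b[j-1] (indices always in range at every reachable call) is ported as
-- equality of the pyGet? options, which agrees with Python's char comparison there.
def levBmemo (a b : List Char) (i j : Nat) (memo : PySem.Dict (Nat × Nat) Int) :
    Int × PySem.Dict (Nat × Nat) Int :=
  match i, j with
  | 0, j => ((j : Int), memo)
  | i + 1, 0 => (((i : Int) + 1), memo)
  | i + 1, j + 1 =>
    match memo.get? (i + 1, j + 1) with
    | some v => (v, memo)
    | none =>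
      let cost : Int := if PySem.List.pyGet? a (i : Int) = PySem.List.pyGet? b (j : Int) then 0 else 1
      let r1 := levBmemo a b i (j + 1) memo
      let r2 := levBmemo a b (i + 1) j r1.2
      let r3 := levBmemo a b i j r2.2
      let v := min (r1.1 + 1) (min (r2.1 + 1) (r3.1 + cost))
      (v, r3.2.insert (i + 1, j + 1) v)
termination_by i + j

def levB (a b : List Char) : Int :=
  (levBmemo a b a.length b.length PySem.Dict.empty).1

def detect_tool_activation_alt (user_input : String) (max_distance : Int) : Bool :=
  let text := PySem.Chars.strip (PySem.Chars.lower user_input.toList)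
  pvPhrases.any (fun p =>
    PySem.Chars.startswith text p ||
    decide (levB (PySem.List.slice text none (some ((p.length : Int) + 2))) p ≤ max_distance))

-- ===== PRECONDITION & SPEC =====
def Spec_detect_tool_activation (user_input : String) (max_distance : Int) (out : Bool) : Prop := out = detect_tool_activation_alt user_input max_distance
instance (user_input : String) (max_distance : Int) (out : Bool) : Decidable (Spec_detect_tool_activation user_input max_distance out) := by unfold Spec_detect_tool_activation; infer_instance

-- ===== CLAIM (what is proved, stated in full; the proofs are below) =====
def Claim_equal_detect_tool_activation : Prop := ∀ (user_input : String) (max_distance : Int), Dom_detect_tool_activation user_input max_distance → Spec_detect_tool_activation user_input max_distance (detect_tool_activation user_input max_distance)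

-- ===== LEMMAS AND PROOFS =====

-- the shared edit-distance recurrence (pure recursion, the common specification)
def levS (a b : List Char) : Nat → Nat → Int
  | 0, j => (j : Int)
  | i + 1, 0 => ((i : Int) + 1)
  | i + 1, j + 1 =>
    min (levS a b i (j + 1) + 1)
      (min (levS a b (i + 1) j + 1)
        (levS a b i j + (if PySem.List.pyGet? a (i : Int) = PySem.List.pyGet? b (j : Int) then 0 else 1)))
termination_by i j => i + j

lemma levS_zero_left (a b : List Char) (j : Nat) : levS a b 0 j = (j : Int) := by
  rw [levS]

lemma levS_succ_succ (a b : List Char) (i j : Nat) :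
    levS a b (i + 1) (j + 1)
      = min (levS a b i (j + 1) + 1)
          (min (levS a b (i + 1) j + 1)
            (levS a b i j + (if PySem.List.pyGet? a (i : Int) = PySem.List.pyGet? b (j : Int) then 0 else 1))) := by
  rw [levS]

lemma levS_zero_right (a b : List Char) (i : Nat) : levS a b i 0 = (i : Int) := by
  cases i
  · rw [levS]
  · rw [levS]; omega

lemma levS_symm (a b : List Char) : ∀ i j, levS a b i j = levS b a j i := by
  intro i j
  induction hn : i + j using Nat.strong_induction_on generalizing i j with
  | _ n ih =>
    subst hn
    match i, j with
    | 0, j => simp [levS_zero_left, levS_zero_right]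
    | i + 1, 0 => simp [levS_zero_left, levS_zero_right]
    | i + 1, j + 1 =>
      rw [levS_succ_succ, levS_succ_succ]
      rw [ih (i + (j + 1)) (by omega) i (j + 1) rfl,
          ih ((i + 1) + j) (by omega) (i + 1) j rfl,
          ih (i + j) (by omega) i j rfl]
      rw [min_left_comm]
      congr 2
      congr 1
      simp [eq_comm]

-- ===== B side: the memoized recursion computes levS =====
def MemoOK (a b : List Char) (m : PySem.Dict (Nat × Nat) Int) : Prop :=
  ∀ p v, m.get? p = some v → v = levS a b p.1 p.2

lemma memoOK_empty (a b : List Char) : MemoOK a b PySem.Dict.empty := by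
  intro p v h
  simp [PySem.Dict.get?_empty] at h

lemma levBmemo_spec (a b : List Char) : ∀ (n i j : Nat), i + j ≤ n →
    ∀ m, MemoOK a b m →
      (levBmemo a b i j m).1 = levS a b i j ∧ MemoOK a b (levBmemo a b i j m).2 := by
  intro n
  induction n with
  | zero =>
    intro i j hij m hm
    have hi : i = 0 := by omega
    have hj : j = 0 := by omega
    subst hi hj
    constructor
    · simp [levBmemo, levS]
    · simpa [levBmemo] using hm
  | succ n ih =>
    intro i j hij m hm
    match i, j with
    | 0, j =>
      constructor
      · simp [levBmemo, levS]
      · simpa [levBmemo] using hm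
    | i + 1, 0 =>
      constructor
      · simp [levBmemo, levS]
      · simpa [levBmemo] using hm
    | i + 1, j + 1 =>
      rw [levBmemo]
      cases hget : m.get? (i + 1, j + 1) with
      | some v =>
        refine ⟨?_, ?_⟩
        · simpa using hm (i + 1, j + 1) v hget
        · simpa using hm
      | none =>
        simp only
        obtain ⟨h1, hm1⟩ := ih i (j + 1) (by omega) m hm
        obtain ⟨h2, hm2⟩ := ih (i + 1) j (by omega) _ hm1
        obtain ⟨h3, hm3⟩ := ih i j (by omega) _ hm2
        constructor
        · simp only [h1, h2, h3]
          rw [levS_succ_succ]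
        · intro p v hv
          rw [PySem.Dict.get?_insert] at hv
          split at hv
          · rename_i hp
            subst hp
            simp only [Option.some.injEq] at hv
            subst hv
            simp only [h1, h2, h3]
            rw [levS_succ_succ]
          · exact hm3 p v hv

lemma levB_eq_levS (a b : List Char) : levB a b = levS a b a.length b.length := by
  have := levBmemo_spec a b (a.length + b.length) a.length b.length (le_refl _)
    PySem.Dict.empty (memoOK_empty a b)
  exact this.1

-- ===== A side: the rolling-row DP computes levS =====

-- one inner pass (over enumerate b j) extends a partial row of levS (s+1) values to the full row
lemma innerA (a b : List Char) (s : Nat) (hs : s < a.length) :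
    ∀ (t : List Char) (j : Nat), b.drop j = t → j ≤ b.length →
      ∀ (cur : List Int), cur = (List.range (j + 1)).map (fun k => levS a b (s + 1) k) →
        (PySem.List.enumerate t (j : Int)).foldl
          (fun cur jc =>
            let insertions := PySem.List.pyGetD ((List.range (b.length + 1)).map (fun k => levS a b s k)) (jc.1 + 1) 0 + 1
            let deletions := PySem.List.pyGetD cur jc.1 0 + 1
            let substitutions := PySem.List.pyGetD ((List.range (b.length + 1)).map (fun k => levS a b s k)) jc.1 0 + (if a[s] ≠ jc.2 then 1 else 0)
            cur ++ [min insertions (min deletions substitutions)]) cur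
        = (List.range (b.length + 1)).map (fun k => levS a b (s + 1) k) := by
  intro t
  induction t with
  | nil =>
    intro j hdrop hj cur hcur
    have hjl : j = b.length := le_antisymm hj (List.drop_eq_nil_iff.mp hdrop)
    subst hjl
    simpa [PySem.List.enumerate] using hcur
  | cons c t' iht =>
    intro j hdrop hj cur hcur
    have hjlt : j < b.length := by
      have hlen := congrArg List.length hdrop
      simp [List.length_drop] at hlen
      omega
    have hd := List.drop_eq_getElem_cons hjlt
    rw [hdrop] at hd
    injection hd with hc ht'
    rw [PySem.List.enumerate_cons, List.foldl_cons]
    have hcast : (j : Int) + 1 = ((j + 1 : Nat) : Int) := by push_cast; ring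
    apply iht (j + 1) ht'.symm (by omega)
    -- the appended cell is levS a b (s+1) (j+1)
    simp only [hcast, PySem.List.pyGetD_natCast]
    rw [hcur]
    have hg1 : ((List.range (b.length + 1)).map (fun k => levS a b s k)).getD (j + 1) 0
        = levS a b s (j + 1) := by
      rw [List.getD_eq_getElem?_getD]
      simp [List.getElem?_map, List.getElem?_range (by omega : j + 1 < b.length + 1)]
    have hg2 : (((List.range (j + 1)).map (fun k => levS a b (s + 1) k)).getD j 0)
        = levS a b (s + 1) j := by
      rw [List.getD_eq_getElem?_getD]
      simp
    have hg3 : ((List.range (b.length + 1)).map (fun k => levS a b s k)).getD j 0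
        = levS a b s j := by
      rw [List.getD_eq_getElem?_getD]
      simp [List.getElem?_map, List.getElem?_range (by omega : j < b.length + 1)]
    rw [hg1, hg2, hg3]
    have hcost : (if a[s] ≠ c then (1 : Int) else 0)
        = (if PySem.List.pyGet? a (s : Int) = PySem.List.pyGet? b (j : Int) then 0 else 1) := by
      rw [PySem.List.pyGet?_natCast, PySem.List.pyGet?_natCast,
          List.getElem?_eq_getElem hs, List.getElem?_eq_getElem hjlt, ← hc]
      by_cases hac : a[s] = c <;> simp [hac]
    have hcell : min (levS a b s (j + 1) + 1)
        (min (levS a b (s + 1) j + 1)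
          (levS a b s j + (if a[s] ≠ c then (1 : Int) else 0)))
        = levS a b (s + 1) (j + 1) := by
      rw [hcost, levS_succ_succ]
    rw [hcell,
        show List.range (j + 1 + 1) = List.range (j + 1) ++ [j + 1] from List.range_succ,
        List.map_append]
    simp

-- the outer pass (over enumerate a s) turns the row of levS s values into the row of levS a.length values
lemma outerA (a b : List Char) :
    ∀ (t : List Char) (s : Nat), a.drop s = t → s ≤ a.length →
      ∀ (prev : List Int), prev = (List.range (b.length + 1)).map (fun k => levS a b s k) →
        (PySem.List.enumerate t (s : Int)).foldl
          (fun prev ic =>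
            (PySem.List.enumerate b 0).foldl
              (fun cur jc =>
                let insertions := PySem.List.pyGetD prev (jc.1 + 1) 0 + 1
                let deletions := PySem.List.pyGetD cur jc.1 0 + 1
                let substitutions := PySem.List.pyGetD prev jc.1 0 + (if ic.2 ≠ jc.2 then 1 else 0)
                cur ++ [min insertions (min deletions substitutions)])
              [ic.1 + 1]) prev
        = (List.range (b.length + 1)).map (fun k => levS a b a.length k) := by
  intro t
  induction t with
  | nil =>
    intro s hdrop hsle prev hprev
    have hsa : a.length = s := le_antisymm (List.drop_eq_nil_iff.mp hdrop) hsle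
    rw [hsa]
    simpa [PySem.List.enumerate] using hprev
  | cons c t' iht =>
    intro s hdrop hsle prev hprev
    have hslt : s < a.length := by
      have hlen := congrArg List.length hdrop
      simp [List.length_drop] at hlen
      omega
    have hd := List.drop_eq_getElem_cons hslt
    rw [hdrop] at hd
    injection hd with hc ht'
    rw [PySem.List.enumerate_cons, List.foldl_cons]
    have hcast : (s : Int) + 1 = ((s + 1 : Nat) : Int) := by push_cast; ring
    apply iht (s + 1) ht'.symm (by omega)
    rw [hprev]
    have hinit : [(s : Int) + 1] = (List.range (0 + 1)).map (fun k => levS a b (s + 1) k) := by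
      simp [List.range_succ, levS_zero_right]
    rw [hinit]
    have := innerA a b s hslt b 0 (by simp) (by omega)
      ((List.range (0 + 1)).map (fun k => levS a b (s + 1) k)) rfl
    simp only [Nat.cast_zero] at this
    rw [← hc] at this
    exact this

lemma levA_eq_levS (a b : List Char) : levA a b = levS a b a.length b.length := by
  induction hb : b.length using Nat.strong_induction_on generalizing a b with
  | _ n ih =>
    subst hb
    rw [levA]
    by_cases h : a.length < b.length
    · rw [dif_pos h]
      rw [ih a.length h b a rfl, levS_symm]
    · rw [dif_neg h]
      by_cases hb0 : b.length = 0
      · rw [if_pos hb0, hb0, levS_zero_right]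
      · rw [if_neg hb0]
        have hfin := outerA a b a 0 (by simp) (by omega)
          ((List.range (b.length + 1)).map (fun n : Nat => (n : Int)))
          (by
            apply List.map_congr_left
            intro k _
            rw [levS_zero_left])
        simp only [Nat.cast_zero] at hfin
        simp only
        rw [hfin]
        rw [List.range_succ, List.map_append]
        simp [PySem.List.pyGetD_neg_one_append_singleton]

lemma lev_eq (a b : List Char) : levA a b = levB a b := by
  rw [levA_eq_levS, levB_eq_levS]

lemma detectLoop_eq (text : List Char) (d : Int) :
    ∀ ps : List (List Char),
      detectLoopA text d ps
        = ps.any (fun p =>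
            PySem.Chars.startswith text p ||
            decide (levB (PySem.List.slice text none (some ((p.length : Int) + 2))) p ≤ d)) := by
  intro ps
  induction ps with
  | nil => simp [detectLoopA]
  | cons p rest ih =>
    rw [detectLoopA, List.any_cons, ← ih]
    by_cases h1 : PySem.Chars.startswith text p <;>
      by_cases h2 : levB (PySem.List.slice text none (some ((p.length : Int) + 2))) p ≤ d <;>
        simp [h1, h2, lev_eq]

-- ===== VERDICT (by name: the statement is the Claim_ definition above) =====
theorem detect_tool_activation_spec : Claim_equal_detect_tool_activation := by
  intro user_input max_distance _
  unfold Spec_detect_tool_activation detect_tool_activation detect_tool_activation_alt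
  exact detectLoop_eq _ _ _
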